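-- pv_equiv track=rewrite | github.com/projeto-MAC0460-cnn-biomas/projeto-cnn-biomas | array_tools.py | get_windows_reduced_inds
-- ===== SOURCE A (Python) =====
-- def get_windows_reduced_inds(arr, dim, center_pos):
--     matrix_n, matrix_m = gdim(arr)
--     start_n, start_m = center_pos
--     end_n = matrix_n - (dim[0] - (center_pos[0] + 1))
--     end_m = matrix_m - (dim[1] - (center_pos[1] + 1))
--     return [[(
--         (i - center_pos[0], i+(dim[0] - (center_pos[0] + 1) + 1)),
--         (j - center_pos[1], j+(dim[1] - (center_pos[1] + 1) + 1))
--         ) for j in range(start_m, end_m)] for i in range(start_n, end_n)]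
--
-- def glen(l):
--     return len(l) if type(l) is list else 1
--
-- def gdim(arr):
--     return (glen(arr), glen(arr[0]))
-- ===== SOURCE B (Python) =====
-- def get_windows_reduced_inds(arr, dim, center_pos):
--     # Observation: the per-cell tuples are independent of center_pos (it cancels
--     # algebraically); the grid is just successive unit shifts of the base
--     # intervals (0, dim[0]) and (0, dim[1]).
--     n = len(arr) if type(arr) is list else 1
--     m = len(arr[0]) if type(arr[0]) is list else 1
--     height = n - dim[0] + 1
--     width = m - dim[1] + 1
--     out = []
--     row_rng = (0, dim[0])
--     for _ in range(height):
--         row = []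
--         col_rng = (0, dim[1])
--         for _ in range(width):
--             row.append((row_rng, col_rng))
--             col_rng = (col_rng[0] + 1, col_rng[1] + 1)
--         out.append(row)
--         row_rng = (row_rng[0] + 1, row_rng[1] + 1)
--     return out
-- ===== Notes on version B (the rewrite author's own statement) =====
-- stated objective: alternative
-- what changed: B drops the per-cell range arithmetic entirely: noting that center_pos cancels algebraically, it computes only the two window counts and builds the grid by incrementally shifting the base intervals (0,dim[0]) and (0,dim[1]) by 1 in a count-driven accumulator loop, instead of evaluating both range formulas for every (i,j) of the index ranges.
-- outside the precondition, e.g. on get_windows_reduced_inds([], (1, 1), (0, 0)): A raises IndexError, B raises IndexError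
import Mathlib
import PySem

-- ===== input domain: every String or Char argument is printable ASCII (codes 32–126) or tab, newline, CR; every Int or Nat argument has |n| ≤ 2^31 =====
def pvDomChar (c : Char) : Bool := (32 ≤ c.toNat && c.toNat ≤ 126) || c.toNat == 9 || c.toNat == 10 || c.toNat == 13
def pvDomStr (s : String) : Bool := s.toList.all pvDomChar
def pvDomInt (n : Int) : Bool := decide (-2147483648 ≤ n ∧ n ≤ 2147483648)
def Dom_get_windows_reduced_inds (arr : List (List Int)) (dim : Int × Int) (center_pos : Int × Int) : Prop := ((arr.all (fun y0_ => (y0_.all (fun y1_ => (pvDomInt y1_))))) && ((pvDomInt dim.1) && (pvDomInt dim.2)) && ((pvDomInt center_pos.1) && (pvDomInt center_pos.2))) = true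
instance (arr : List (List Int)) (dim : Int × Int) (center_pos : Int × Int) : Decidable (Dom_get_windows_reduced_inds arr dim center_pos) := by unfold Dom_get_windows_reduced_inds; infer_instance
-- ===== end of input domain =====

-- B replaces the per-cell range arithmetic (which center_pos cancels out of) by
-- incrementally shifting the base intervals (0,dim0)/(0,dim1) across a count-driven
-- double loop; alternative decomposition, same cost.


-- ===== PORT A =====
-- gdim(arr): arr[0] raises IndexError on empty arr — those inputs are excluded by Pre_;
-- the `none` branch below is never reached inside Pre_.
def get_windows_reduced_inds (arr : List (List Int)) (dim : Int × Int) (center_pos : Int × Int) : List (List ((Int × Int) × (Int × Int))) :=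
  match PySem.List.pyGet? arr 0 with
  | none => []
  | some row0 =>
    let matrix_n : Int := arr.length
    let matrix_m : Int := row0.length
    let start_n : Int := center_pos.1
    let start_m : Int := center_pos.2
    let end_n : Int := matrix_n - (dim.1 - (center_pos.1 + 1))
    let end_m : Int := matrix_m - (dim.2 - (center_pos.2 + 1))
    (PySem.List.pyRange start_n end_n 1).map (fun i =>
      (PySem.List.pyRange start_m end_m 1).map (fun j =>
        ((i - center_pos.1, i + (dim.1 - (center_pos.1 + 1) + 1)),
         (j - center_pos.2, j + (dim.2 - (center_pos.2 + 1) + 1)))))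

-- ===== PORT B =====
-- inner loop of Source B: append `width` cells, shifting the column interval by 1 each step
def pvBRow (w : Nat) (row_rng col_rng : Int × Int) : List ((Int × Int) × (Int × Int)) :=
  match w with
  | 0 => []
  | Nat.succ k => (row_rng, col_rng) :: pvBRow k row_rng (col_rng.1 + 1, col_rng.2 + 1)

-- outer loop of Source B: append `height` rows, shifting the row interval by 1 each step
def pvBGrid (h w : Nat) (row_rng : Int × Int) (d1 : Int) : List (List ((Int × Int) × (Int × Int))) :=
  match h with
  | 0 => []
  | Nat.succ k => pvBRow w row_rng (0, d1) :: pvBGrid k w (row_rng.1 + 1, row_rng.2 + 1) d1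

-- same `arr[0]` access as A; `none` branch unreachable inside Pre_
def get_windows_reduced_inds_alt (arr : List (List Int)) (dim : Int × Int) (center_pos : Int × Int) : List (List ((Int × Int) × (Int × Int))) :=
  match PySem.List.pyGet? arr 0 with
  | none => []
  | some row0 =>
    let n : Int := arr.length
    let m : Int := row0.length
    let height : Int := n - dim.1 + 1
    let width : Int := m - dim.2 + 1
    pvBGrid height.toNat width.toNat (0, dim.1) dim.2

-- ===== PRECONDITION & SPEC =====
-- Pre_ excludes exactly the inputs where Python A raises: empty arr (arr[0] IndexError in gdim).
def Pre_get_windows_reduced_inds (arr : List (List Int)) (dim : Int × Int) (center_pos : Int × Int) : Prop := arr ≠ []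
instance (arr : List (List Int)) (dim : Int × Int) (center_pos : Int × Int) : Decidable (Pre_get_windows_reduced_inds arr dim center_pos) := by unfold Pre_get_windows_reduced_inds; infer_instance
def pvWitness_get_windows_reduced_inds : List (List Int) × (Int × Int) × (Int × Int) := ([[1, 2, 3], [4, 5, 6], [7, 8, 9]], (2, 2), (0, 1))
def Spec_get_windows_reduced_inds (arr : List (List Int)) (dim : Int × Int) (center_pos : Int × Int) (out : List (List ((Int × Int) × (Int × Int)))) : Prop := out = get_windows_reduced_inds_alt arr dim center_pos
instance (arr : List (List Int)) (dim : Int × Int) (center_pos : Int × Int) (out : List (List ((Int × Int) × (Int × Int)))) : Decidable (Spec_get_windows_reduced_inds arr dim center_pos out) := by unfold Spec_get_windows_reduced_inds; infer_instance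

-- ===== CLAIM (what is proved, stated in full; the proofs are below) =====
def Claim_equal_get_windows_reduced_inds : Prop := ∀ (arr : List (List Int)) (dim : Int × Int) (center_pos : Int × Int), Dom_get_windows_reduced_inds arr dim center_pos → Pre_get_windows_reduced_inds arr dim center_pos → Spec_get_windows_reduced_inds arr dim center_pos (get_windows_reduced_inds arr dim center_pos)

-- ===== LEMMAS AND PROOFS =====

theorem pvBRow_eq (w : Nat) (rr : Int × Int) (c0 c1 : Int) :
    pvBRow w rr (c0, c1) = (List.range w).map (fun b : Nat => (rr, (c0 + (b : Int), c1 + (b : Int)))) := by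
  induction w generalizing c0 c1 with
  | zero => rfl
  | succ k ih =>
    rw [List.range_succ_eq_map, List.map_cons, List.map_map]
    simp only [pvBRow, ih]
    congr 1
    · norm_num
    · apply List.map_congr_left
      intro b _
      simp only [Function.comp, Prod.mk.injEq]
      and_intros <;> first | trivial | (push_cast; ring)

theorem pvBGrid_eq (h w : Nat) (r0 d0 d1 : Int) :
    pvBGrid h w (r0, r0 + d0) d1 =
      (List.range h).map (fun a : Nat =>
        (List.range w).map (fun b : Nat =>
          ((r0 + (a : Int), r0 + (a : Int) + d0), ((b : Int), (b : Int) + d1)))) := by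
  induction h generalizing r0 with
  | zero => rfl
  | succ k ih =>
    rw [List.range_succ_eq_map, List.map_cons, List.map_map]
    simp only [pvBGrid]
    rw [show (r0 + d0 + 1 : Int) = (r0 + 1) + d0 by ring, ih (r0 + 1)]
    congr 1
    · rw [show ((0 : Int), d1) = ((0 : Int), 0 + d1) by simp, pvBRow_eq]
      apply List.map_congr_left
      intro b _
      simp only [Prod.mk.injEq]
      and_intros <;> first | trivial | (push_cast; ring)
    · apply List.map_congr_left
      intro a _
      simp only [Function.comp]
      apply List.map_congr_left
      intro b _
      simp only [Prod.mk.injEq]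
      and_intros <;> first | trivial | (push_cast; ring)

-- ===== VERDICT (by name: the statement is the Claim_ definition above) =====
theorem get_windows_reduced_inds_spec : Claim_equal_get_windows_reduced_inds := by
  intro arr dim cp _ _
  unfold Spec_get_windows_reduced_inds get_windows_reduced_inds get_windows_reduced_inds_alt
  cases h : PySem.List.pyGet? arr 0 with
  | none => rfl
  | some row0 =>
    simp only []
    rw [show ((0 : Int), dim.1) = ((0 : Int), 0 + dim.1) by simp, pvBGrid_eq]
    rw [PySem.List.pyRange_one, PySem.List.pyRange_one, List.map_map]
    have hn : ((arr.length : Int) - (dim.1 - (cp.1 + 1)) - cp.1) = ((arr.length : Int) - dim.1 + 1) := by ring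
    have hm : ((row0.length : Int) - (dim.2 - (cp.2 + 1)) - cp.2) = ((row0.length : Int) - dim.2 + 1) := by ring
    rw [hn, hm]
    apply List.map_congr_left
    intro a _
    simp only [Function.comp]
    rw [List.map_map]
    apply List.map_congr_left
    intro b _
    simp only [Function.comp, Prod.mk.injEq]
    and_intros <;> first | trivial | (push_cast; ring)
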